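-- pv_equiv track=rewrite | github.com/letr007/CCTVVideoDownloader | src/decrypt/decrypt.py | find_nalu_start
-- ===== SOURCE A (Python) =====
-- def find_nalu_start(buf, pos, total):
--     """查找 NAL 单元起始位置"""
--     while pos + 2 < total:
--         if buf[pos+2] == 0:
--             if pos + 3 < total and buf[pos+1] == 0 and buf[pos+3] == 1:
--                 return pos + 1
--             pos += 2
--         elif buf[pos+2] == 1:
--             if buf[pos] == 0 and buf[pos+1] == 0:
--                 return pos
--             pos += 3
--         else:
--             pos += 3
--     return total
-- ===== SOURCE B (Python) =====
-- def find_nalu_start(buf, pos, total):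
--     """查找 NAL 单元起始位置"""
--     hit = next((i for i in range(pos, total - 2)
--                 if buf[i] == 0 and buf[i+1] == 0 and buf[i+2] == 1), None)
--     return total if hit is None else hit
-- ===== Notes on version B (the rewrite author's own statement) =====
-- stated objective: simpler
-- what changed: Replaces A's anchored variable-skip stepping loop (branching on buf[pos+2] with +2/+3 jumps and a pos+1 match case) by generating the candidate index range and taking the first index where the full 00 00 01 pattern matches (next over a generator / find? over a range).
-- outside the precondition, e.g. on find_nalu_start([0, 0, 1], 0, 100): A returns 0, B returns 0
import Mathlib
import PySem

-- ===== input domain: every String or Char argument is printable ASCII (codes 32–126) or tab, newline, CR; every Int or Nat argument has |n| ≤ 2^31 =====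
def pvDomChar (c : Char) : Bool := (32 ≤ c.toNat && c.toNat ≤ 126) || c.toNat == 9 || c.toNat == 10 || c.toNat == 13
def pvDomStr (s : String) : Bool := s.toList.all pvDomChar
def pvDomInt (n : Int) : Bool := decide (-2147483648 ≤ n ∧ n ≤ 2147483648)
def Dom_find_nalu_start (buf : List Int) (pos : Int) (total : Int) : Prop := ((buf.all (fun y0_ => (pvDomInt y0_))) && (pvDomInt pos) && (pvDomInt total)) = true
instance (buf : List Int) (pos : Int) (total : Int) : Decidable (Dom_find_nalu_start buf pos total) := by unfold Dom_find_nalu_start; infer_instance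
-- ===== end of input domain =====

-- B replaces A's anchored variable-skip stepping loop by "first index in range(pos, total-2)
-- where the full 00 00 01 pattern matches" (find? over the candidate range; objective: simpler).


-- buf[i] with Python indexing; the .getD 0 default is only reached where Python raises
-- IndexError, and Pre_ excludes exactly those inputs.
def pvBufGet (buf : List Int) (i : Int) : Int := (PySem.List.pyGet? buf i).getD 0

-- ===== PORT A =====
def find_nalu_start (buf : List Int) (pos : Int) (total : Int) : Int :=
  if _h : pos + 2 < total then
    if pvBufGet buf (pos + 2) = 0 then
      if pos + 3 < total ∧ pvBufGet buf (pos + 1) = 0 ∧ pvBufGet buf (pos + 3) = 1 then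
        pos + 1
      else
        find_nalu_start buf (pos + 2) total
    else if pvBufGet buf (pos + 2) = 1 then
      if pvBufGet buf pos = 0 ∧ pvBufGet buf (pos + 1) = 0 then
        pos
      else
        find_nalu_start buf (pos + 3) total
    else
      find_nalu_start buf (pos + 3) total
  else total
termination_by (total - pos).toNat
decreasing_by all_goals omega

-- ===== PORT B =====
-- Source B: next((i for i in range(pos, total-2) if pattern at i), None); total if None.
def find_nalu_start_alt (buf : List Int) (pos : Int) (total : Int) : Int :=
  match (PySem.List.pyRange pos (total - 2) 1).find?
      (fun i => pvBufGet buf i == 0 && pvBufGet buf (i + 1) == 0 && pvBufGet buf (i + 2) == 1) with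
  | some i => i
  | none => total

-- ===== PRECONDITION & SPEC =====
-- Pre_ excludes inputs that can make an index access raise IndexError (total beyond
-- len(buf), or pos below -len(buf)); on some such inputs A happens to return before
-- reaching an out-of-range index, and B agrees there.
def Pre_find_nalu_start (buf : List Int) (pos : Int) (total : Int) : Prop :=
  (-(buf.length : Int) ≤ pos ∧ total ≤ (buf.length : Int)) ∨ total ≤ pos + 2
instance (buf : List Int) (pos : Int) (total : Int) : Decidable (Pre_find_nalu_start buf pos total) := by unfold Pre_find_nalu_start; infer_instance

def pvWitness_find_nalu_start : List Int × Int × Int := ([2, 0, 0, 1, 5], 0, 5)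

def Spec_find_nalu_start (buf : List Int) (pos : Int) (total : Int) (out : Int) : Prop := out = find_nalu_start_alt buf pos total
instance (buf : List Int) (pos : Int) (total : Int) (out : Int) : Decidable (Spec_find_nalu_start buf pos total out) := by unfold Spec_find_nalu_start; infer_instance

-- ===== CLAIM (what is proved, stated in full; the proofs are below) =====
def Claim_equal_find_nalu_start : Prop := ∀ (buf : List Int) (pos : Int) (total : Int), Dom_find_nalu_start buf pos total → Pre_find_nalu_start buf pos total → Spec_find_nalu_start buf pos total (find_nalu_start buf pos total)

-- ===== LEMMAS AND PROOFS =====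

-- One unfolding step of B, read off from find? over the cons/nil shape of the range.
lemma alt_step (buf : List Int) (pos total : Int) :
    find_nalu_start_alt buf pos total =
      if pos + 2 < total then
        if pvBufGet buf pos = 0 ∧ pvBufGet buf (pos + 1) = 0 ∧ pvBufGet buf (pos + 2) = 1 then
          pos
        else find_nalu_start_alt buf (pos + 1) total
      else total := by
  by_cases hb : pos + 2 < total
  · rw [if_pos hb]
    unfold find_nalu_start_alt
    rw [PySem.List.pyRange_one_cons (by omega : pos < total - 2), List.find?_cons]
    by_cases hm : pvBufGet buf pos = 0 ∧ pvBufGet buf (pos + 1) = 0 ∧ pvBufGet buf (pos + 2) = 1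
    · simp [hm]
    · rw [if_neg hm]
      have : (pvBufGet buf pos == 0 && pvBufGet buf (pos + 1) == 0 && pvBufGet buf (pos + 2) == 1) = false := by
        simp only [Bool.and_eq_false_iff, beq_eq_false_iff_ne, ne_eq]; tauto
      simp [this]
  · rw [if_neg hb]
    unfold find_nalu_start_alt
    rw [PySem.List.pyRange_one_eq_nil (by omega : total - 2 ≤ pos)]
    simp

-- If the pattern does not match at pos, B's answer from pos equals its answer from pos+1
-- (also when the window runs out: both sides are then total).
lemma alt_skip (buf : List Int) (pos total : Int)
    (h : ¬ (pvBufGet buf pos = 0 ∧ pvBufGet buf (pos + 1) = 0 ∧ pvBufGet buf (pos + 2) = 1)) :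
    find_nalu_start_alt buf pos total = find_nalu_start_alt buf (pos + 1) total := by
  rw [alt_step]
  by_cases hb : pos + 2 < total
  · simp [hb, h]
  · rw [if_neg hb, alt_step, if_neg (by omega)]

-- A = B from every starting position (no in-range hypothesis needed: both ports read the
-- buffer through the same total function pvBufGet).
lemma eq_from (buf : List Int) (total pos : Int) :
    find_nalu_start buf pos total = find_nalu_start_alt buf pos total := by
  have e1 : pos + 1 + 1 = pos + 2 := by ring
  have e2 : pos + 1 + 2 = pos + 3 := by ring
  have e3 : pos + 2 + 1 = pos + 3 := by ring
  rw [find_nalu_start]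
  split_ifs with hb h2 hc h1 hm
  · -- A returns pos+1; B skips pos (third byte is 0, not 1) then matches at pos+1
    rw [alt_skip buf pos total (by simp [h2]), alt_step, e1, if_pos (by omega), e2,
      if_pos ⟨hc.2.1, h2, hc.2.2⟩]
  · -- A recurses at pos+2; B skips pos and pos+1
    rw [eq_from buf total (pos + 2), alt_skip buf pos total (by simp [h2])]
    by_cases h3 : pos + 3 < total
    · rw [alt_skip buf (pos + 1) total (by rw [e1, e2]; rintro ⟨ha, _, hd⟩; exact hc ⟨h3, ha, hd⟩), e1]
    · -- window exhausted: both sides are total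
      rw [alt_step buf (pos + 2) total, if_neg (show ¬pos + 2 + 2 < total by omega),
        alt_step buf (pos + 1) total, if_neg (show ¬pos + 1 + 2 < total by omega)]
  · -- both return pos
    rw [alt_step, if_pos hb, if_pos ⟨hm.1, hm.2, h1⟩]
  · -- A recurses at pos+3; B skips pos, pos+1, pos+2
    rw [eq_from buf total (pos + 3), alt_skip buf pos total (by tauto),
      alt_skip buf (pos + 1) total (by rw [e1]; rintro ⟨_, hx, _⟩; exact h2 hx), e1,
      alt_skip buf (pos + 2) total (by rintro ⟨hx, _, _⟩; exact h2 hx), e3]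
  · -- third byte neither 0 nor 1; A recurses at pos+3; B skips three positions
    rw [eq_from buf total (pos + 3),
      alt_skip buf pos total (by rintro ⟨_, _, hx⟩; exact h1 hx),
      alt_skip buf (pos + 1) total (by rw [e1]; rintro ⟨_, hx, _⟩; exact h2 hx), e1,
      alt_skip buf (pos + 2) total (by rintro ⟨hx, _, _⟩; exact h2 hx), e3]
  · rw [alt_step, if_neg hb]
termination_by (total - pos).toNat
decreasing_by all_goals omega

-- ===== VERDICT (by name: the statement is the Claim_ definition above) =====
theorem find_nalu_start_spec : Claim_equal_find_nalu_start := by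
  intro buf pos total _ _
  unfold Spec_find_nalu_start
  exact eq_from buf total pos
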